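-- pv_equiv track=rewrite | github.com/fiddlydiddle/advent_of_code | 2017/day17/python/part2.py | part2
-- ===== SOURCE A (Python) =====
-- class Node:
--     def __init__(self, val):
--         self.val = val
--         self.next = None
--
-- def insert(node, val):
--     # before: node -> former_next
--     # after:  node -> new_next -> former_next
--     former_next = node.next
--     new_next = Node(val)
--     node.next = new_next
--     new_next.next = former_next
--
-- def part2(num_steps_per_iteration, num_iterations):
--     # Initalize linked list with 1 node whose value is 0
--     current_node = Node(0)
--     current_node.next = current_node
--     first_node = current_node # Part 2, keep reference to initial node for after steps are complete
--
--     # Perform steps and insertions the required number of iterations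
--     for value_to_insert in range(1, num_iterations + 1):
--         # take required steps
--         next_node = current_node
--         for _ in range(num_steps_per_iteration):
--             next_node = next_node.next
--
--         # insert new node and step to it
--         insert(next_node, value_to_insert)
--         current_node = next_node.next
--
--     # take final step and return
--     current_node = current_node.next
--     return current_node.val, first_node.next.val
-- ===== SOURCE B (Python) =====
-- def part2(num_steps_per_iteration, num_iterations):
--     # O(n): track insertion indices by modular arithmetic (no buffer is built),
--     # then recover the two requested elements by a backward trace over the indices.
--     steps = max(num_steps_per_iteration, 0)  # range(k) takes no steps for k <= 0
--     n = max(num_iterations, 0)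
--     ins = [0] * (n + 1)  # ins[v] = index at which value v was inserted
--     pos = 0
--     for v in range(1, n + 1):
--         pos = (pos + steps) % v + 1  # buffer size before inserting v is v
--         ins[v] = pos
--
--     def at_index(t):
--         # element at index t of the final buffer, found by undoing insertions
--         for v in range(n, 0, -1):
--             p = ins[v]
--             if p == t:
--                 return v
--             if p < t:
--                 t -= 1
--         return 0
--
--     size = n + 1
--     return at_index((pos + 1) % size), at_index(1 % size)
-- ===== Notes on version B (the rewrite author's own statement) =====
-- stated objective: faster
-- what changed: Replaces the step-by-step circular linked-list simulation with pure modular arithmetic on insertion indices plus a backward trace that recovers the two requested elements, so no buffer is built and no per-step walking occurs.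
import Mathlib
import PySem

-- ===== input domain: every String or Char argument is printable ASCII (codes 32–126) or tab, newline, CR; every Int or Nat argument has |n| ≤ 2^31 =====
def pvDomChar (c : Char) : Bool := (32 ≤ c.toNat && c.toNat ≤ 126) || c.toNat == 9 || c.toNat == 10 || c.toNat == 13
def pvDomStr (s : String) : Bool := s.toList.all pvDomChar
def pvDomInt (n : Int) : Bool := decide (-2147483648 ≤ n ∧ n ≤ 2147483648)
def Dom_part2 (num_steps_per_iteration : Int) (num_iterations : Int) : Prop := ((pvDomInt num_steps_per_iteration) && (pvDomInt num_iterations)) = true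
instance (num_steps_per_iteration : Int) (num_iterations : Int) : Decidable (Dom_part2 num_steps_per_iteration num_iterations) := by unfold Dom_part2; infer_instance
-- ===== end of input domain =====

-- B replaces A's per-step circular linked-list walk with O(n) modular arithmetic on
-- insertion indices plus a backward trace recovering the two requested elements.

-- ===== PORT A =====
-- A's circular linked list is modelled as the buffer of node values in order from
-- node 0 (following .next) together with the index of current_node: following
-- .next once is index (p+1) % length, and `insert` splices the new value in
-- right after the given index. The returned tuple is the 2-element list.
def part2 (num_steps_per_iteration : Int) (num_iterations : Int) : List Int :=
  let fin := (PySem.List.pyRange 1 (num_iterations + 1) 1).foldl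
    (fun (st : List Int × Int) value_to_insert =>
      let pos2 := (PySem.List.pyRange 0 num_steps_per_iteration 1).foldl
        (fun p _ => (p + 1) % (st.1.length : Int)) st.2
      (st.1.take (pos2 + 1).toNat ++ value_to_insert :: st.1.drop (pos2 + 1).toNat, pos2 + 1))
    ([0], 0)
  [fin.1.getD ((fin.2 + 1) % (fin.1.length : Int)).toNat 0,
   fin.1.getD ((1 : Int) % (fin.1.length : Int)).toNat 0]

-- ===== PORT B =====
-- Source B's at_index: undo the insertions (listed as (value, insertion index),
-- latest first) to locate the element at index t of the final buffer.
def traceBack : List (Int × Int) → Int → Int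
  | [], _ => 0
  | (v, p) :: rest, t =>
      if p = t then v else if p < t then traceBack rest (t - 1) else traceBack rest t

def part2_alt (num_steps_per_iteration : Int) (num_iterations : Int) : List Int :=
  let steps := max num_steps_per_iteration 0
  let n := max num_iterations 0
  let fin := (PySem.List.pyRange 1 (n + 1) 1).foldl
    (fun (st : List (Int × Int) × Int) v =>
      let pos := (st.2 + steps) % v + 1
      (st.1 ++ [(v, pos)], pos))
    ([], 0)
  let size := n + 1
  [traceBack fin.1.reverse ((fin.2 + 1) % size), traceBack fin.1.reverse (1 % size)]

-- ===== PRECONDITION & SPEC =====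
def Spec_part2 (num_steps_per_iteration : Int) (num_iterations : Int) (out : List Int) : Prop := out = part2_alt num_steps_per_iteration num_iterations
instance (num_steps_per_iteration : Int) (num_iterations : Int) (out : List Int) : Decidable (Spec_part2 num_steps_per_iteration num_iterations out) := by unfold Spec_part2; infer_instance

-- ===== CLAIM (what is proved, stated in full; the proofs are below) =====
def Claim_equal_part2 : Prop := ∀ (num_steps_per_iteration : Int) (num_iterations : Int), Dom_part2 num_steps_per_iteration num_iterations → Spec_part2 num_steps_per_iteration num_iterations (part2 num_steps_per_iteration num_iterations)

-- ===== LEMMAS AND PROOFS =====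

-- insertion of v at index p
def insAt (p : Nat) (v : Int) (b : List Int) : List Int := b.take p ++ v :: b.drop p

-- insertion index of value k (index of current node after inserting k)
def posRec (s : Int) : Nat → Int
  | 0 => 0
  | k + 1 => (posRec s k + s) % ((k : Int) + 1) + 1

-- buffer after the first k insertions
def bufRec (s : Int) : Nat → List Int
  | 0 => [0]
  | k + 1 => insAt (posRec s (k + 1)).toNat ((k : Int) + 1) (bufRec s k)

-- the (value, insertion index) log, oldest first
def insList (s : Int) : Nat → List (Int × Int)
  | 0 => []
  | k + 1 => insList s k ++ [((k : Int) + 1, posRec s (k + 1))]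

lemma posRec_bounds (s : Int) : ∀ k : Nat, 0 ≤ posRec s k ∧ posRec s k ≤ (k : Int) := by
  intro k
  induction k with
  | zero => simp [posRec]
  | succ k ih =>
    have h1 : (0 : Int) < (k : Int) + 1 := by positivity
    have h2 := Int.emod_nonneg (posRec s k + s) (by omega : ((k : Int) + 1) ≠ 0)
    have h3 := Int.emod_lt_of_pos (posRec s k + s) h1
    simp only [posRec]
    push_cast
    omega

lemma length_insAt (p : Nat) (v : Int) (b : List Int) (hp : p ≤ b.length) :
    (insAt p v b).length = b.length + 1 := by
  simp only [insAt, List.length_append, List.length_cons, List.length_take, List.length_drop]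
  omega

lemma bufRec_length (s : Int) : ∀ k : Nat, (bufRec s k).length = k + 1 := by
  intro k
  induction k with
  | zero => simp [bufRec]
  | succ k ih =>
    have hb := posRec_bounds s (k + 1)
    have hp : (posRec s (k + 1)).toNat ≤ (bufRec s k).length := by
      rw [ih]; omega
    simp [bufRec, length_insAt _ _ _ hp, ih]

lemma getD_insAt (p : Nat) (v : Int) (b : List Int) (hp : p ≤ b.length) (m : Nat) :
    (insAt p v b).getD m 0 =
      if m = p then v else if p < m then b.getD (m - 1) 0 else b.getD m 0 := by
  have hlt : (b.take p).length = p := by simp; omega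
  by_cases h1 : m = p
  · subst h1
    simp [insAt, List.getD, List.getElem?_append_right, hlt]
  · by_cases h2 : p < m
    · have : (b.take p).length ≤ m := by omega
      simp only [insAt, List.getD, List.getElem?_append_right this, hlt]
      have hm : m - p = (m - p - 1) + 1 := by omega
      rw [hm]
      simp only [List.getElem?_cons_succ, List.getElem?_drop]
      have : p + (m - p - 1) = m - 1 := by omega
      rw [this]
      simp [h1, h2]
    · have hmp : m < p := by omega
      have : m < (b.take p).length := by omega
      simp only [insAt, List.getD, List.getElem?_append_left this]
      rw [List.getElem?_take_of_lt hmp]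
      simp [h1, h2]

lemma trace_eq_lookup (s : Int) :
    ∀ (k : Nat) (t : Int), 0 ≤ t →
      traceBack (insList s k).reverse t = (bufRec s k).getD t.toNat 0 := by
  intro k
  induction k with
  | zero =>
    intro t ht
    simp only [insList, List.reverse_nil, traceBack, bufRec]
    cases h : t.toNat with
    | zero => simp
    | succ m => simp [List.getD]
  | succ k ih =>
    intro t ht
    have hb := posRec_bounds s (k + 1)
    have hlen := bufRec_length s k
    have hp : (posRec s (k + 1)).toNat ≤ (bufRec s k).length := by rw [hlen]; push_cast at hb; omega
    have hp1 : 1 ≤ posRec s (k + 1) := by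
      have h := Int.emod_nonneg (posRec s k + s) (by omega : ((k : Int) + 1) ≠ 0)
      simp only [posRec]
      omega
    simp only [insList, List.reverse_append, List.reverse_cons, List.reverse_nil,
      List.nil_append, List.cons_append, traceBack, bufRec]
    rw [getD_insAt _ _ _ hp]
    by_cases h1 : posRec s (k + 1) = t
    · have : t.toNat = (posRec s (k + 1)).toNat := by rw [h1]
      simp [h1, this]
    · by_cases h2 : posRec s (k + 1) < t
      · have ht1 : 0 ≤ t - 1 := by omega
        have e1 : t.toNat ≠ (posRec s (k + 1)).toNat := by omega
        have e2 : (posRec s (k + 1)).toNat < t.toNat := by omega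
        have e3 : (t - 1).toNat = t.toNat - 1 := by omega
        simp only [h1, h2, if_true, if_false, e1, e2, ih (t - 1) ht1, e3]
      · have e1 : t.toNat ≠ (posRec s (k + 1)).toNat := by omega
        have e2 : ¬ (posRec s (k + 1)).toNat < t.toNat := by omega
        simp only [h1, h2, if_false, ih t ht, e1, e2]

lemma foldl_step (L : Int) (hL : 0 < L) :
    ∀ (l : List Int) (p : Int), 0 ≤ p → p < L →
      l.foldl (fun q _ => (q + 1) % L) p = (p + l.length) % L := by
  intro l
  induction l with
  | nil =>
    intro p h0 h1
    simp [Int.emod_eq_of_lt h0 h1]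
  | cons x xs ih =>
    intro p h0 h1
    have hq0 : 0 ≤ (p + 1) % L := Int.emod_nonneg _ (by omega)
    have hq1 : (p + 1) % L < L := Int.emod_lt_of_pos _ hL
    simp only [List.foldl_cons, ih _ hq0 hq1, Int.emod_add_emod, List.length_cons]
    push_cast
    ring_nf

-- A's outer fold computes (bufRec, posRec)
lemma partA_fold (s : Int) : ∀ n : Nat,
    (PySem.List.pyRange 1 ((n : Int) + 1) 1).foldl
      (fun (st : List Int × Int) value_to_insert =>
        let pos2 := (PySem.List.pyRange 0 s 1).foldl
          (fun p _ => (p + 1) % (st.1.length : Int)) st.2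
        (st.1.take (pos2 + 1).toNat ++ value_to_insert :: st.1.drop (pos2 + 1).toNat, pos2 + 1))
      ([0], 0)
    = (bufRec (max s 0) n, posRec (max s 0) n) := by
  intro n
  induction n with
  | zero => simp [PySem.List.pyRange_one_eq_nil, bufRec, posRec]
  | succ n ih =>
    have hlen : ((bufRec (max s 0) n).length : Int) = (n : Int) + 1 := by
      rw [bufRec_length (max s 0) n]; push_cast; ring
    have hbnd := posRec_bounds (max s 0) n
    have hinner : (PySem.List.pyRange 0 s 1).foldl
        (fun p _ => (p + 1) % ((bufRec (max s 0) n).length : Int)) (posRec (max s 0) n)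
        = (posRec (max s 0) n + max s 0) % ((n : Int) + 1) := by
      simp only [hlen]
      rw [foldl_step ((n : Int) + 1) (by positivity) _ _ hbnd.1 (by omega)]
      rw [PySem.List.length_pyRange_one]
      simp only [sub_zero]
      rw [Int.toNat_eq_max]
    push_cast
    rw [PySem.List.pyRange_one_succ_right (by omega : (1 : Int) ≤ (n : Int) + 1),
      List.foldl_append, ih]
    simp only [List.foldl_cons, List.foldl_nil, hinner]
    simp only [Prod.mk.injEq]
    refine ⟨?_, ?_⟩
    · simp only [bufRec, insAt, posRec]
    · simp only [posRec]

-- B's outer fold computes (insList, posRec)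
lemma partB_fold (s : Int) : ∀ n : Nat,
    (PySem.List.pyRange 1 ((n : Int) + 1) 1).foldl
      (fun (st : List (Int × Int) × Int) v =>
        let pos := (st.2 + s) % v + 1
        (st.1 ++ [(v, pos)], pos))
      ([], 0)
    = (insList s n, posRec s n) := by
  intro n
  induction n with
  | zero => simp [PySem.List.pyRange_one_eq_nil, insList, posRec]
  | succ n ih =>
    push_cast
    rw [PySem.List.pyRange_one_succ_right (by omega : (1 : Int) ≤ (n : Int) + 1),
      List.foldl_append, ih]
    simp only [List.foldl_cons, List.foldl_nil, Prod.mk.injEq]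
    refine ⟨?_, ?_⟩
    · simp only [insList, posRec]
    · simp only [posRec]

lemma range_collapse (n : Int) : PySem.List.pyRange 1 (n + 1) 1
    = PySem.List.pyRange 1 ((n.toNat : Int) + 1) 1 := by
  by_cases h : 0 ≤ n
  · rw [Int.toNat_of_nonneg h]
  · rw [PySem.List.pyRange_one_eq_nil (by omega), PySem.List.pyRange_one_eq_nil (by omega)]

-- ===== VERDICT (by name: the statement is the Claim_ definition above) =====
theorem part2_spec : Claim_equal_part2 := by
  intro s n _
  unfold Spec_part2 part2 part2_alt
  have hn : max n 0 = (n.toNat : Int) := by rw [Int.toNat_eq_max]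
  simp only [range_collapse n, hn, partA_fold s n.toNat, partB_fold (max s 0) n.toNat]
  have hlen : ((bufRec (max s 0) n.toNat).length : Int) = (n.toNat : Int) + 1 := by
    rw [bufRec_length (max s 0) n.toNat]; push_cast; ring
  rw [hlen]
  have hpos : (0 : Int) < (n.toNat : Int) + 1 := by positivity
  have h1 : 0 ≤ (posRec (max s 0) n.toNat + 1) % ((n.toNat : Int) + 1) :=
    Int.emod_nonneg _ (by omega)
  have h2 : 0 ≤ (1 : Int) % ((n.toNat : Int) + 1) := Int.emod_nonneg _ (by omega)
  rw [← trace_eq_lookup (max s 0) n.toNat _ h1, ← trace_eq_lookup (max s 0) n.toNat _ h2]
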